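-- pv_equiv track=rewrite | github.com/LikeCafelatte/Practice | Algorithm study/Greedy Algorithm/Reallocation_110.py | remove110
-- ===== SOURCE A (Python) =====
-- def remove110(s):
--     if not '110' in s:
--         return s
--     temp, zero, one, last = [], 0, 0, ''
--     for c in s:
--         if c == '0':
--             zero += 1
--         else:
--             if c != last:
--                 if one >= 2 * zero:
--                     zero, one = 0, one - 2 * zero
--                 else:
--                     zero, one = zero - one // 2 , one % 2
--                     temp.append('1' * one + '0' * zero)
--                     zero, one = 0, 0
--             one += 1
--         last = c
--     zero, one = (0, one - 2 * zero) if one > 2 * zero else (zero - one // 2 , one % 2)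
--     temp.append('1' * one + '0' * zero)
--     return "".join(temp)
-- ===== SOURCE B (Python) =====
-- def remove110(s):
--     if '110' not in s:
--         return s
--     st = []
--     for c in s:
--         if c == '0' and len(st) >= 2 and st[-1] == '1' and st[-2] == '1':
--             st.pop()
--             st.pop()
--         else:
--             st.append('0' if c == '0' else '1')
--     return ''.join(st)
-- ===== Notes on version B (the rewrite author's own statement) =====
-- stated objective: simpler
-- what changed: Replaced A's run-length counters and closed-form per-segment emission with a single explicit stack that pops the two trailing one-characters whenever a zero-character arrives, deleting each one-one-zero pattern greedily in one uniform pass.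
import Mathlib
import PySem

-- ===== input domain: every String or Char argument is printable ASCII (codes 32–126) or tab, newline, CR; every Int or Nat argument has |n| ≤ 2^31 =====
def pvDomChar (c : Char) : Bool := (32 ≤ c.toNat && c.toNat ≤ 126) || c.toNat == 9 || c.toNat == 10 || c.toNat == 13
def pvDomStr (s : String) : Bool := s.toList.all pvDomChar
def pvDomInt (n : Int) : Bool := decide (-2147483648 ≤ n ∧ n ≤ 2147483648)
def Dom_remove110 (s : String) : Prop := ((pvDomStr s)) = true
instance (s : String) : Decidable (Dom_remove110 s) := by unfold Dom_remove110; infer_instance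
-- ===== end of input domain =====

-- B replaces A's run-length counters and closed-form per-segment emission with one
-- uniform explicit stack that pops the two trailing one-characters whenever a
-- zero-character arrives (objective: simpler).

-- ===== PORT A =====
-- loop body of A; state = (temp, zero, one, last); last is the previously seen
-- one-character string (initially the empty string '', modelled as []).
def remove110StepA (a : List (List Char) × Int × Int × List Char) (c : Char) :
    List (List Char) × Int × Int × List Char :=
  let (temp, zero, one, _last) := a
  if c = '0' then
    (temp, zero + 1, one, [c])
  else
    let (temp, zero, one) :=
      if [c] ≠ _last then
        if one ≥ 2 * zero then
          (temp, (0 : Int), one - 2 * zero)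
        else
          -- zero, one = zero - one // 2, one % 2; temp.append('1'*one + '0'*zero); zero, one = 0, 0
          let zero' := zero - PySem.Int.floordiv one 2
          let one' := PySem.Int.mod one 2
          (temp ++ [PySem.List.pyRepeat ['1'] one' ++ PySem.List.pyRepeat ['0'] zero'],
           (0 : Int), (0 : Int))
      else (temp, zero, one)
    (temp, zero, one + 1, [c])

-- the code after the loop: final reassignment of (zero, one), last append, join
def remove110Finish (temp : List (List Char)) (zero one : Int) : List Char :=
  let (zero, one) :=
    if one > 2 * zero then ((0 : Int), one - 2 * zero)
    else (zero - PySem.Int.floordiv one 2, PySem.Int.mod one 2)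
  (temp ++ [PySem.List.pyRepeat ['1'] one ++ PySem.List.pyRepeat ['0'] zero]).flatten

def remove110 (s : String) : String :=
  if !PySem.Str.isIn "110" s then s
  else
    let fin := s.toList.foldl remove110StepA ([], 0, 0, [])
    String.ofList (remove110Finish fin.1 fin.2.1 fin.2.2.1)

-- ===== PORT B =====
-- loop body of B; the Python list used as a stack is kept REVERSED (head = top = st[-1]),
-- so append = cons and the two pops = tail.tail.
def remove110StepB (st : List Char) (c : Char) : List Char :=
  if c = '0' ∧ 2 ≤ st.length ∧ st.head? = some '1' ∧ st.tail.head? = some '1' then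
    st.tail.tail
  else
    (if c = '0' then '0' else '1') :: st

def remove110_alt (s : String) : String :=
  if !PySem.Str.isIn "110" s then s
  else String.ofList ((s.toList.foldl remove110StepB []).reverse)

-- ===== PRECONDITION & SPEC =====
def Spec_remove110 (s : String) (out : String) : Prop := out = remove110_alt s
instance (s : String) (out : String) : Decidable (Spec_remove110 s out) := by
  unfold Spec_remove110; infer_instance

-- ===== CLAIM (what is proved, stated in full; the proofs are below) =====
def Claim_equal_remove110 : Prop := ∀ (s : String), Dom_remove110 s → Spec_remove110 s (remove110 s)

-- ===== LEMMAS AND PROOFS =====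

-- the reversed rendering of a pending run of o ones followed by z zeros after greedy
-- 110-deletion: 0^(z-o/2) 1^(o%2) if o < 2z, else 1^(o-2z)
def pvG (o z : Nat) : List Char :=
  if 2 * z ≤ o then List.replicate (o - 2 * z) '1'
  else List.replicate (z - o / 2) '0' ++ List.replicate (o % 2) '1'

-- coupling invariant between A's loop state and B's (reversed) stack
def pvInv (a : List (List Char) × Int × Int × List Char) (st : List Char) : Prop :=
  ∃ z o : Nat, a.2.1 = (z : Int) ∧ a.2.2.1 = (o : Int) ∧
    st = pvG o z ++ a.1.flatten.reverse ∧
    (a.1.flatten.reverse = [] ∨ a.1.flatten.reverse.head? = some '0') ∧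
    (∀ c : Char, a.2.2.2 = [c] → c ≠ '0' → z = 0)

lemma pvFD (o : Nat) : PySem.Int.floordiv (o : Int) 2 = ((o / 2 : Nat) : Int) := by
  rw [PySem.Int.floordiv_eq_ediv_of_pos (by norm_num)]; omega

lemma pvMOD (o : Nat) : PySem.Int.mod (o : Int) 2 = ((o % 2 : Nat) : Int) := by
  rw [PySem.Int.mod_eq_emod_of_pos (by norm_num)]; omega

lemma pvRep (n : Nat) (c : Char) : PySem.List.pyRepeat [c] (n : Int) = List.replicate n c := by
  rw [PySem.List.pyRepeat_singleton]; simp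

lemma pvInv_init : pvInv ([], 0, 0, []) [] := by
  refine ⟨0, 0, rfl, rfl, by simp [pvG], by simp, by simp⟩

-- how B's stack evolves on a zero-character over the invariant's stack shape
lemma pvStepB_zero (o z : Nat) (F : List Char) (hF : F = [] ∨ F.head? = some '0') :
    remove110StepB (pvG o z ++ F) '0' = pvG o (z+1) ++ F := by
  rw [pvG, pvG]
  by_cases h1 : 2*z ≤ o
  · rw [if_pos h1]
    by_cases h2 : 2*z + 2 ≤ o
    · rw [show o - 2*z = (o - 2*(z+1)) + 1 + 1 by omega]
      rw [if_pos (show 2*(z+1) ≤ o by omega)]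
      simp [remove110StepB, List.replicate_succ]
    · by_cases h3 : o = 2*z + 1
      · rw [if_neg (show ¬ 2*(z+1) ≤ o by omega), h3]
        rw [show 2*z + 1 - 2*z = 1 by omega, show z + 1 - (2*z+1)/2 = 1 by omega,
            show (2*z+1) % 2 = 1 by omega]
        rcases hF with h | h
        · subst h; simp [remove110StepB]
        · obtain ⟨f, F', rfl⟩ : ∃ f F', F = f :: F' := by
            cases F with
            | nil => simp at h
            | cons f F' => exact ⟨f, F', rfl⟩
          simp at h; subst h
          simp [remove110StepB]
      · have ho : o = 2*z := by omega
        subst ho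
        rw [if_neg (show ¬ 2*(z+1) ≤ 2*z by omega)]
        rw [show 2*z - 2*z = 0 by omega, show z + 1 - (2*z)/2 = 1 by omega,
            show (2*z) % 2 = 0 by omega]
        rcases hF with h | h
        · subst h; simp [remove110StepB]
        · obtain ⟨f, F', rfl⟩ : ∃ f F', F = f :: F' := by
            cases F with
            | nil => simp at h
            | cons f F' => exact ⟨f, F', rfl⟩
          simp at h; subst h
          simp [remove110StepB]
  · rw [if_neg h1, if_neg (show ¬ 2*(z+1) ≤ o by omega)]
    rw [show z - o/2 = (z - 1 - o/2) + 1 by omega,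
        show z + 1 - o/2 = (z - 1 - o/2) + 1 + 1 by omega]
    simp [remove110StepB, List.replicate_succ]

lemma pvStepB_one (st : List Char) (c : Char) (hc : c ≠ '0') :
    remove110StepB st c = '1' :: st := by
  simp [remove110StepB, hc]

lemma pvInv_step (a : List (List Char) × Int × Int × List Char) (st : List Char) (c : Char)
    (h : pvInv a st) : pvInv (remove110StepA a c) (remove110StepB st c) := by
  obtain ⟨temp, zero, one, last⟩ := a
  obtain ⟨z, o, hz, ho, hst, hF, hlast⟩ := h
  simp only at hz ho hst hF hlast
  subst hz ho hst
  by_cases hc : c = '0'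
  · subst hc
    have hA : remove110StepA (temp, ((z:Nat):Int), ((o:Nat):Int), last) '0'
        = (temp, ((z:Int)+1 : Int), ((o:Nat):Int), ['0']) := by
      simp [remove110StepA]
    rw [hA]
    refine ⟨z + 1, o, by push_cast; ring, rfl, pvStepB_zero o z _ hF, hF, ?_⟩
    intro c' hc' h'; simp at hc'; exact absurd hc'.symm h'
  · rw [pvStepB_one _ c hc]
    by_cases hl : [c] = last
    · have hz0 : z = 0 := hlast c hl.symm hc
      subst hz0
      have hA : remove110StepA (temp, ((0:Nat):Int), ((o:Nat):Int), last) c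
          = (temp, ((0:Nat):Int), ((o:Nat):Int)+1, [c]) := by
        simp [remove110StepA, hc, hl]
      rw [hA]
      refine ⟨0, o + 1, rfl, by push_cast; ring, ?_, hF, fun _ _ _ => rfl⟩
      rw [pvG, pvG, if_pos (by omega), if_pos (by omega)]
      rw [show o - 2*0 = o by omega, show o + 1 - 2*0 = o + 1 by omega,
          List.replicate_succ]
      rfl
    · by_cases h1 : (o : Int) ≥ 2 * (z : Int)
      · have h1' : 2*z ≤ o := by omega
        have hA : remove110StepA (temp, ((z:Nat):Int), ((o:Nat):Int), last) c
            = (temp, (0:Int), ((o:Int) - 2*(z:Int))+1, [c]) := by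
          simp [remove110StepA, hc, hl, h1]
        rw [hA]
        refine ⟨0, o - 2*z + 1, by norm_num, by push_cast; omega, ?_, hF, fun _ _ _ => rfl⟩
        rw [pvG, pvG, if_pos h1', if_pos (by omega)]
        rw [show o - 2*z + 1 - 2*0 = (o - 2*z) + 1 by omega, List.replicate_succ]
        rfl
      · have h1' : ¬ 2*z ≤ o := by omega
        have hA : remove110StepA (temp, ((z:Nat):Int), ((o:Nat):Int), last) c
            = (temp ++ [PySem.List.pyRepeat ['1'] (PySem.Int.mod (o:Int) 2) ++
                PySem.List.pyRepeat ['0'] ((z:Int) - PySem.Int.floordiv (o:Int) 2)],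
               (0:Int), (0:Int)+1, [c]) := by
          simp [remove110StepA, hc, hl, h1]
        rw [hA]
        refine ⟨0, 1, by norm_num, by norm_num, ?_, ?_, fun _ _ _ => rfl⟩ <;>
          simp only [pvMOD, pvFD,
            show ((z:Int) - ((o/2 : Nat):Int)) = ((z - o/2 : Nat) : Int) by omega, pvRep,
            List.flatten_append, List.flatten, List.append_nil, List.reverse_append,
            List.reverse_replicate]
        · rw [pvG, if_neg h1', pvG, if_pos (by omega : 2*0 ≤ 1)]
          simp
        · right
          rw [show z - o/2 = (z - 1 - o/2) + 1 by omega, List.replicate_succ']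
          simp

lemma pvInv_foldl (l : List Char) (a : List (List Char) × Int × Int × List Char)
    (st : List Char) (h : pvInv a st) :
    pvInv (l.foldl remove110StepA a) (l.foldl remove110StepB st) := by
  induction l generalizing a st with
  | nil => exact h
  | cons c l ih => exact ih _ _ (pvInv_step a st c h)

lemma pvInv_finish (a : List (List Char) × Int × Int × List Char) (st : List Char)
    (h : pvInv a st) : remove110Finish a.1 a.2.1 a.2.2.1 = st.reverse := by
  obtain ⟨temp, zero, one, last⟩ := a
  obtain ⟨z, o, hz, ho, hst, hF, hlast⟩ := h
  simp only at hz ho hst ⊢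
  subst hz ho hst
  rw [remove110Finish, pvG]
  simp only [List.reverse_append, List.reverse_reverse]
  by_cases h1 : (o:Int) > 2*(z:Int)
  · have h2 : 2*z ≤ o := by omega
    rw [if_pos h1, if_pos h2,
        show ((o:Int) - 2*(z:Int)) = ((o - 2*z : Nat) : Int) by omega,
        pvRep, show ((0:Int)) = ((0:Nat):Int) by omega, pvRep]
    simp [List.reverse_append]
  · rw [if_neg h1, pvMOD, pvRep, pvFD,
        show ((z:Int) - ((o/2 : Nat):Int)) = ((z - o/2 : Nat) : Int) by omega, pvRep]
    by_cases h2 : 2*z ≤ o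
    · have ho : o = 2*z := by omega
      rw [if_pos h2]
      simp [ho]
    · rw [if_neg h2]
      simp [List.reverse_append]

-- ===== VERDICT (by name: the statement is the Claim_ definition above) =====
theorem remove110_spec : Claim_equal_remove110 := by
  intro s _
  unfold Spec_remove110 remove110 remove110_alt
  cases h : PySem.Str.isIn "110" s with
  | false => simp
  | true =>
    simp only [Bool.not_true, Bool.false_eq_true, if_false]
    have := pvInv_finish _ _ (pvInv_foldl s.toList _ _ pvInv_init)
    rw [this]
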